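-- pv_equiv track=rewrite | github.com/nortikin/sverchok | utils/sv_mesh_utils.py | non_redundant_faces_indices
-- ===== SOURCE A (Python) =====
-- def non_redundant_faces_indices(faces):
--     '''
--     Removes repeated indices from faces and removes faces with less than three indices
--     faces: list of faces - List[List[Int]]
--     returns Tuple (valid faces - List[List[Int]],
--                    Boolean List with preserved items marked as True - List[bool])
--     '''
--     faces_out = []
--     preseved_mask = []
--     for f in faces:
--         new_face = []
--         for idx, c in enumerate(f):
--             if c != f[idx-1]:
--                 new_face.append(c)
--         if len(new_face) > 2:
--             faces_out.append(new_face)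
--             preseved_mask.append(True)
--         else:
--             preseved_mask.append(False)
--
--     return faces_out, preseved_mask
-- ===== SOURCE B (Python) =====
-- def non_redundant_faces_indices(faces):
--     # Stage 1: decide each face by pure counting of cyclic boundaries
--     # (no intermediate face list is built for rejected faces).
--     mask = [sum(p != c for p, c in zip(f, f[1:])) + (len(f) > 0 and f[-1] != f[0]) > 2
--             for f in faces]
--     # Stage 2: materialize only the surviving faces by zipping each face
--     # with its cyclic predecessor rotation.
--     faces_out = [[c for p, c in zip([f[-1]] + f, f) if p != c]
--                  for f, keep in zip(faces, mask) if keep]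
--     return faces_out, mask
-- ===== Notes on version B (the rewrite author's own statement) =====
-- stated objective: alternative
-- what changed: Replaced A's single per-face appending loop (build the deduped list element-by-element against f[idx-1], then test its length) by two staged passes: a counting pass that computes the keep-mask purely by summing differing cyclic-adjacent pairs without building any list, and a second pass that materializes only the surviving faces by zipping each face with its cyclic predecessor rotation; rejected faces are never allocated.
import Mathlib
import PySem

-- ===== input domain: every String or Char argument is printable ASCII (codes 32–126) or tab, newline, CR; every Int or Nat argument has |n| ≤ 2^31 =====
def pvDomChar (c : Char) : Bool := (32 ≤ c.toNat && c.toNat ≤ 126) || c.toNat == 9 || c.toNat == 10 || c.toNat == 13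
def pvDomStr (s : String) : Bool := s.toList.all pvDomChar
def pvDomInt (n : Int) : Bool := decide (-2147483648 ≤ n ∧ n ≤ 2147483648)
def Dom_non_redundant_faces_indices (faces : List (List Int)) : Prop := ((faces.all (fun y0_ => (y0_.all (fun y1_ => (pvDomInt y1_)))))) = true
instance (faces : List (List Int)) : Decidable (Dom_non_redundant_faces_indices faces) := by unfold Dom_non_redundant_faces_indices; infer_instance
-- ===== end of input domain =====

-- B replaces A's per-face appending loop by two staged passes: a counting pass that
-- computes the keep-mask without building any list, then a pass that materializes
-- only the surviving faces by zipping with the cyclic predecessor rotation;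
-- objective: alternative decomposition, same asymptotic cost.

-- ===== PORT A =====
-- inner loop: 'for idx, c in enumerate(f): if c != f[idx-1]: new_face.append(c)'
-- (f is nonempty whenever the loop body runs, so f[idx-1] never raises; the 'none'
-- branch of pyGet? is unreachable and ports the would-be IndexError as a no-op)
def aFaceGo (f : List Int) : List Int → Nat → List Int → List Int
  | [], _, acc => acc
  | c :: rest, idx, acc =>
      aFaceGo f rest (idx + 1)
        (match PySem.List.pyGet? f ((idx : Int) - 1) with
         | some p => if c ≠ p then acc ++ [c] else acc
         | none => acc)

def non_redundant_faces_indices (faces : List (List Int)) : List (List Int) × List Bool :=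
  faces.foldl
    (fun (st : List (List Int) × List Bool) f =>
      let new_face := aFaceGo f f 0 []
      if new_face.length > 2 then (st.1 ++ [new_face], st.2 ++ [true])
      else (st.1, st.2 ++ [false]))
    ([], [])

-- ===== PORT B =====
-- 'sum(p != c for p, c in zip(f, f[1:])) + (len(f) > 0 and f[-1] != f[0])' (an int)
def bCount (f : List Int) : Int :=
  (f.zip f.tail).foldl (fun s pc => s + (if pc.1 ≠ pc.2 then 1 else 0)) 0
    + (match f with
       | [] => 0
       | a :: _ => match f.getLast? with
                   | some l => if l ≠ a then 1 else 0
                   | none => 0)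

-- '[c for p, c in zip([f[-1]] + f, f) if p != c]'; only evaluated on faces with a
-- true mask bit (so f nonempty and getLast? = some); the none branch is unreachable
def bDedup (f : List Int) : List Int :=
  match f.getLast? with
  | none => []
  | some l => (((l :: f).zip f).filter (fun pc => pc.1 ≠ pc.2)).map Prod.snd

def non_redundant_faces_indices_alt (faces : List (List Int)) : List (List Int) × List Bool :=
  let mask := faces.map (fun f => decide (bCount f > 2))
  let faces_out := ((faces.zip mask).filter (fun fm => fm.2)).map (fun fm => bDedup fm.1)
  (faces_out, mask)

-- ===== PRECONDITION & SPEC =====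
def Spec_non_redundant_faces_indices (faces : List (List Int)) (out : List (List Int) × List Bool) : Prop := out = non_redundant_faces_indices_alt faces
instance (faces : List (List Int)) (out : List (List Int) × List Bool) : Decidable (Spec_non_redundant_faces_indices faces out) := by unfold Spec_non_redundant_faces_indices; infer_instance

-- ===== CLAIM (what is proved, stated in full; the proofs are below) =====
def Claim_equal_non_redundant_faces_indices : Prop := ∀ (faces : List (List Int)), Dom_non_redundant_faces_indices faces → Spec_non_redundant_faces_indices faces (non_redundant_faces_indices faces)

-- ===== LEMMAS AND PROOFS =====

-- common characterisation of both per-face computations: keep c iff it differs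
-- from its predecessor
def keepTail : Int → List Int → List Int
  | _, [] => []
  | p, c :: rest => if c ≠ p then c :: keepTail c rest else keepTail c rest

theorem aFaceGo_eq (f : List Int) :
    ∀ (rest : List Int) (idx : Nat) (acc : List Int) (p : Int),
      f.drop idx = rest → 1 ≤ idx → f[idx - 1]? = some p →
      aFaceGo f rest idx acc = acc ++ keepTail p rest := by
  intro rest
  induction rest with
  | nil => intro idx acc p _ _ _; simp [aFaceGo, keepTail]
  | cons c r ih =>
    intro idx acc p hdrop hidx hget
    have hget' : PySem.List.pyGet? f ((idx : Int) - 1) = some p := by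
      have h1 : ((idx : Int) - 1) = ((idx - 1 : Nat) : Int) := by omega
      rw [h1, PySem.List.pyGet?_natCast, hget]
    have hc : f[idx]? = some c := by
      have := congrArg (fun l => l[0]?) hdrop
      simpa [List.getElem?_drop] using this
    have hdrop' : f.drop (idx + 1) = r := by
      have := congrArg List.tail hdrop
      simpa [List.tail_drop] using this
    have hget'' : f[(idx + 1) - 1]? = some c := by simpa using hc
    simp only [aFaceGo, hget']
    rw [ih (idx + 1) _ c hdrop' (by omega) hget'']
    by_cases h : c = p <;> simp [keepTail, h]

theorem aFace_eq (a : Int) (rest : List Int) (L : Int)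
    (hL : (a :: rest).getLast? = some L) :
    aFaceGo (a :: rest) (a :: rest) 0 [] =
      (if a ≠ L then [a] else []) ++ keepTail a rest := by
  have hm1 : PySem.List.pyGet? (a :: rest) (((0 : Nat) : Int) - 1) = some L := by
    have h0 : (((0 : Nat) : Int) - 1) = (-1 : Int) := by omega
    rw [h0, PySem.List.pyGet?_neg_one, hL]
  simp only [aFaceGo, hm1]
  rw [aFaceGo_eq (a :: rest) rest 1 _ a rfl (by omega) (by simp)]
  by_cases h : a = L <;> simp [h]

-- B's zip-with-rotation comprehension computes keepTail
theorem zip_filter_eq_keepTail (l : List Int) :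
    ∀ p : Int, (((p :: l).zip l).filter (fun pc => pc.1 ≠ pc.2)).map Prod.snd
      = keepTail p l := by
  induction l with
  | nil => intro p; simp [keepTail]
  | cons c r ih =>
    intro p
    simp only [List.zip_cons_cons, List.filter_cons]
    by_cases h : c = p
    · subst h
      simpa [keepTail] using ih c
    · have h' : p ≠ c := fun e => h e.symm
      simp only [keepTail, ne_eq, h, not_false_eq_true, if_pos trivial]
      rw [← ih c]
      simp [h']

-- B's counting pass computes keepTail's length (plus the head's own bit)
theorem count_fold_eq (l : List Int) :
    ∀ (p : Int) (s : Int),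
      ((p :: l).zip l).foldl (fun s pc => s + (if pc.1 ≠ pc.2 then 1 else 0)) s
        = s + (keepTail p l).length := by
  induction l with
  | nil => intro p s; simp [keepTail]
  | cons c r ih =>
    intro p s
    by_cases h : c = p
    · subst h
      simpa [keepTail] using ih c s
    · simp only [List.zip_cons_cons, List.foldl_cons]
      rw [ih c]
      simp [keepTail, h, Ne.symm h]
      omega

theorem bCount_eq (a : Int) (rest : List Int) (L : Int)
    (hL : (a :: rest).getLast? = some L) :
    bCount (a :: rest)
      = ((if a ≠ L then [a] else []) ++ keepTail a rest).length := by
  unfold bCount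
  simp only [List.tail_cons, hL]
  rw [count_fold_eq rest a 0]
  by_cases h : a = L <;> simp [h, eq_comm]

-- per-face agreement packaged for the outer induction
theorem mask_agree (f : List Int) :
    decide (bCount f > 2) = decide ((aFaceGo f f 0 []).length > 2) := by
  cases f with
  | nil => simp [bCount, aFaceGo]
  | cons a rest =>
    cases hL : (a :: rest).getLast? with
    | none => simp at hL
    | some L =>
      rw [aFace_eq a rest L hL, bCount_eq a rest L hL]
      simp
      omega

theorem face_agree (f : List Int) (h : (aFaceGo f f 0 []).length > 2) :
    bDedup f = aFaceGo f f 0 [] := by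
  cases f with
  | nil => simp [aFaceGo] at h
  | cons a rest =>
    cases hL : (a :: rest).getLast? with
    | none => simp at hL
    | some L =>
      rw [aFace_eq a rest L hL]
      have hb : bDedup (a :: rest)
          = (((L :: a :: rest).zip (a :: rest)).filter
              (fun pc => pc.1 ≠ pc.2)).map Prod.snd := by
        simp [bDedup, hL]
      rw [hb, zip_filter_eq_keepTail (a :: rest) L]
      by_cases h' : a = L <;> simp [keepTail, h']

-- outer loop: A's foldl with appended accumulators equals B's staged passes
theorem outer_eq (faces : List (List Int)) :
    ∀ (acc1 : List (List Int)) (acc2 : List Bool),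
      faces.foldl
        (fun (st : List (List Int) × List Bool) f =>
          let new_face := aFaceGo f f 0 []
          if new_face.length > 2 then (st.1 ++ [new_face], st.2 ++ [true])
          else (st.1, st.2 ++ [false]))
        (acc1, acc2)
      = (acc1 ++ ((faces.zip (faces.map (fun f => decide (bCount f > 2)))).filter
                    (fun fm => fm.2)).map (fun fm => bDedup fm.1),
         acc2 ++ faces.map (fun f => decide (bCount f > 2))) := by
  induction faces with
  | nil => intro acc1 acc2; simp
  | cons f fs ih =>
    intro acc1 acc2
    simp only [List.foldl_cons, List.map_cons, List.zip_cons_cons, List.filter_cons]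
    by_cases hlen : (aFaceGo f f 0 []).length > 2
    · have hm : decide (bCount f > 2) = true := by rw [mask_agree]; exact decide_eq_true hlen
      simp only [if_pos hlen, hm]
      rw [ih]
      simp [face_agree f hlen]
    · have hm : decide (bCount f > 2) = false := by rw [mask_agree]; exact decide_eq_false hlen
      simp only [if_neg hlen, hm]
      rw [ih]
      simp

-- ===== VERDICT (by name: the statement is the Claim_ definition above) =====
theorem non_redundant_faces_indices_spec : Claim_equal_non_redundant_faces_indices := by
  intro faces _
  unfold Spec_non_redundant_faces_indices non_redundant_faces_indices non_redundant_faces_indices_alt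
  rw [outer_eq faces [] []]
  simp
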